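-- pv_equiv track=rewrite | github.com/Justinosh06/BioInsight | build_msi_v5.py | create_wix_directory_structure
-- ===== SOURCE A (Python) =====
-- def create_wix_directory_structure(directories):
--     """Create WiX Directory XML"""
--     # Build tree
--     tree = {}
--     for parent, dir_id, name in directories:
--         if parent not in tree:
--             tree[parent] = []
--         tree[parent].append((dir_id, name))
--
--     def build_xml(parent_id, level=0):
--         if parent_id not in tree:
--             return ""
--
--         indent = "  " * level
--         xml_parts = []
--
--         for dir_id, name in sorted(tree[parent_id]):
--             child_xml = build_xml(dir_id, level + 1)
--             if child_xml:
--                 xml_parts.append(f'''{indent}      <Directory Id="{dir_id}" Name="{name}">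
-- {child_xml}{indent}      </Directory>''')
--             else:
--                 xml_parts.append(f'''{indent}      <Directory Id="{dir_id}" Name="{name}" />''')
--
--         return "\n".join(xml_parts)
--
--     return build_xml("INSTALLFOLDER", 4)
-- ===== SOURCE B (Python) =====
-- def create_wix_directory_structure(directories):
--     """Create WiX Directory XML (iterative: explicit stack of open/close tokens)"""
--     children = {}
--     for parent, dir_id, name in directories:
--         if parent not in children:
--             children[parent] = []
--         children[parent].append((dir_id, name))
--
--     lines = []
--     stack = [("open", d, n, 4) for d, n in reversed(sorted(children.get("INSTALLFOLDER", [])))]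
--     while stack:
--         tag, d, n, level = stack.pop()
--         pad = "  " * level + "      "
--         if tag == "close":
--             lines[-1] += pad + "</Directory>"
--         elif d in children:
--             lines.append(f'{pad}<Directory Id="{d}" Name="{n}">')
--             stack.append(("close", "", "", level))
--             for c, m in reversed(sorted(children[d])):
--                 stack.append(("open", c, m, level + 1))
--         else:
--             lines.append(f'{pad}<Directory Id="{d}" Name="{n}" />')
--     return "\n".join(lines)
-- ===== Notes on version B (the rewrite author's own statement) =====
-- stated objective: alternative
-- what changed: A's recursive build_xml that assembles and joins nested per-level strings is replaced by a non-recursive while loop over an explicit stack of ('open'/'close', id, name, level) tokens that emits flat output lines (gluing each closing tag onto the last emitted line) and joins them once at the end; Pre_ excludes exactly the inputs whose parent->child edge list has a cycle reachable from INSTALLFOLDER, on which A raises RecursionError (and B's loop diverges).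
import Mathlib
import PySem

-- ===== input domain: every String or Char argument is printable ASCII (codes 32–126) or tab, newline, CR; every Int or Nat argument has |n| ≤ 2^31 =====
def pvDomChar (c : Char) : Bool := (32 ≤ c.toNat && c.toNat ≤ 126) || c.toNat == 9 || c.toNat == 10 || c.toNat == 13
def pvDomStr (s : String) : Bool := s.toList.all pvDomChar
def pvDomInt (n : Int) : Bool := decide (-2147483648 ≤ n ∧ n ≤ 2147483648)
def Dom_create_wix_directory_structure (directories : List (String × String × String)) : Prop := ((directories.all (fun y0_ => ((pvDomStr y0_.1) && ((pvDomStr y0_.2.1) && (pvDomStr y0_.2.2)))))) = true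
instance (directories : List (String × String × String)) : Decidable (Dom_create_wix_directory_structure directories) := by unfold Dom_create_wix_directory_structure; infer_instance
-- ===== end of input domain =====

-- B replaces A's recursive string-building DFS by an iterative loop over an explicit
-- stack of open/close tokens that appends output lines (alternative decomposition,
-- same return value on every input where A returns).


-- ===== PORT A =====
-- tree = {}; for parent, dir_id, name in directories: append (dir_id, name) to tree[parent]
def pvTreeA (directories : List (String × String × String)) :
    PySem.Dict String (List (String × String)) :=
  directories.foldl (fun tree t => tree.modify t.1 [] (fun l => l ++ [t.2])) PySem.Dict.empty

-- build_xml(parent_id, level); the Nat fuel only guards totality (on cycle-free input,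
-- the only inputs inside Pre_, the Python recursion depth is < the fuel below)
def pvBuildXmlA (tree : PySem.Dict String (List (String × String))) :
    Nat → String → Nat → String
  | 0, _, _ => ""
  | fuel+1, parentId, level =>
    if tree.contains parentId = false then ""
    else
      let indent : String := String.ofList (PySem.List.pyRepeat [' ', ' '] (level : Int))
      let parts : List String :=
        (PySem.List.sorted2 (tree.getD parentId []) (fun dn => dn.1) (fun dn => dn.2)).foldl
          (fun acc dn =>
            let childXml := pvBuildXmlA tree fuel dn.1 (level + 1)
            if childXml ≠ "" then
              acc ++ [indent ++ "      <Directory Id=\"" ++ dn.1 ++ "\" Name=\"" ++ dn.2 ++ "\">\n"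
                      ++ childXml ++ indent ++ "      </Directory>"]
            else
              acc ++ [indent ++ "      <Directory Id=\"" ++ dn.1 ++ "\" Name=\"" ++ dn.2 ++ "\" />"]) []
      PySem.Str.join "\n" parts

def create_wix_directory_structure (directories : List (String × String × String)) : String :=
  pvBuildXmlA (pvTreeA directories) (directories.length + 1) "INSTALLFOLDER" 4

-- ===== PORT B =====
-- children = {}; same grouping loop as the Python B
def pvTreeB (directories : List (String × String × String)) :
    PySem.Dict String (List (String × String)) :=
  directories.foldl (fun d t => d.modify t.1 [] (fun l => l ++ [t.2])) PySem.Dict.empty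

-- fuel for the while loop, a totality guard only: inside Pre_ the loop runs fewer
-- iterations than this bound (proved below), so the port is exact there
def pvFuelB (directories : List (String × String × String)) : Nat :=
  (2 * directories.length + 2) ^ (directories.length + 2)

-- the while loop; stack tokens are ("open", dir_id, name, level) / ("close", _, _, level);
-- the Lean list holds the TOP of the Python stack first (Python pushes reversed(sorted(..)),
-- i.e. pops children in sorted order = our head-first sorted token block)
def pvMachineB (tree : PySem.Dict String (List (String × String))) :
    Nat → List (String × String × String × Nat) → List String → List String
  | 0, _, lines => lines
  | _+1, [], lines => lines
  | fuel+1, tok :: rest, lines =>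
    let pad : String := String.ofList (PySem.List.pyRepeat [' ', ' '] ((tok.2.2.2 : Nat) : Int)) ++ "      "
    if tok.1 == "close" then
      -- lines[-1] += pad + "</Directory>"  (never reached on an empty lines list)
      pvMachineB tree fuel rest
        (PySem.List.pySetD lines (-1) (PySem.List.pyGetD lines (-1) "" ++ pad ++ "</Directory>"))
    else if tree.contains tok.2.1 then
      pvMachineB tree fuel
        (((PySem.List.sorted2 (tree.getD tok.2.1 []) (fun dn => dn.1) (fun dn => dn.2)).map
            (fun dn => ("open", dn.1, dn.2, tok.2.2.2 + 1))) ++ ("close", "", "", tok.2.2.2) :: rest)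
        (lines ++ [pad ++ "<Directory Id=\"" ++ tok.2.1 ++ "\" Name=\"" ++ tok.2.2.1 ++ "\">"])
    else
      pvMachineB tree fuel rest
        (lines ++ [pad ++ "<Directory Id=\"" ++ tok.2.1 ++ "\" Name=\"" ++ tok.2.2.1 ++ "\" />"])

def create_wix_directory_structure_alt (directories : List (String × String × String)) : String :=
  let children := pvTreeB directories
  PySem.Str.join "\n"
    (pvMachineB children (pvFuelB directories)
      ((PySem.List.sorted2 (children.getD "INSTALLFOLDER" []) (fun dn => dn.1) (fun dn => dn.2)).map
        (fun dn => ("open", dn.1, dn.2, (4 : Nat)))) [])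

-- ===== PRECONDITION & SPEC =====
def pvEdges (directories : List (String × String × String)) : List (String × String) :=
  directories.map (fun t => (t.1, t.2.1))

-- Kahn-style elimination: repeatedly drop edges whose source is no edge's target;
-- returns true iff the given edge list is cycle-free.
def pvAcyclic : Nat → List (String × String) → Bool
  | _, [] => true
  | 0, _ => false
  | n+1, es =>
    let rest := es.filter (fun e => es.any (fun e' => e'.2 == e.1))
    if rest.length == es.length then false else pvAcyclic n rest

-- nodes reachable from the start set along the edges (round-based closure; each round
-- adds the new targets of edges from already-reached sources, without duplicates)
def pvReach (es : List (String × String)) : Nat → List String → List String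
  | 0, r => r
  | n+1, r =>
    let add := (((es.filter (fun e => r.contains e.1)).map (fun e => e.2)).filter
        (fun b => !(r.contains b))).dedup
    if add = [] then r else pvReach es n (r ++ add)

def pvReachable (directories : List (String × String × String)) : List String :=
  pvReach (pvEdges directories) ((pvEdges directories).length + 1) ["INSTALLFOLDER"]

def pvESR (directories : List (String × String × String)) : List (String × String) :=
  (pvEdges directories).filter (fun e => (pvReachable directories).contains e.1)

-- Pre_ excludes exactly the inputs whose parent->child edges contain a cycle reachable
-- from "INSTALLFOLDER": on those (and only those) A's recursion never terminates, so the
-- Python A raises RecursionError instead of returning (B's while loop never empties its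
-- stack there and diverges).  On every input where A returns, Pre_ holds.
def Pre_create_wix_directory_structure (directories : List (String × String × String)) : Prop :=
  pvAcyclic (pvESR directories).length (pvESR directories) = true

instance (directories : List (String × String × String)) : Decidable (Pre_create_wix_directory_structure directories) := by
  unfold Pre_create_wix_directory_structure; infer_instance

def pvWitness_create_wix_directory_structure : (List (String × String × String)) :=
  [("INSTALLFOLDER", "PFILES", "App"), ("PFILES", "BINDIR", "bin")]

def Spec_create_wix_directory_structure (directories : List (String × String × String)) (out : String) : Prop := out = create_wix_directory_structure_alt directories
instance (directories : List (String × String × String)) (out : String) : Decidable (Spec_create_wix_directory_structure directories out) := by unfold Spec_create_wix_directory_structure; infer_instance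

-- ===== CLAIM (what is proved, stated in full; the proofs are below) =====
def Claim_equal_create_wix_directory_structure : Prop := ∀ (directories : List (String × String × String)), Dom_create_wix_directory_structure directories → Pre_create_wix_directory_structure directories → Spec_create_wix_directory_structure directories (create_wix_directory_structure directories)

-- ===== LEMMAS AND PROOFS =====

-- the XML text fragments, named
def pvPad (level : Nat) : String :=
  String.ofList (PySem.List.pyRepeat [' ', ' '] (level : Int)) ++ "      "
def pvOpenLine (d n : String) (level : Nat) : String :=
  pvPad level ++ "<Directory Id=\"" ++ d ++ "\" Name=\"" ++ n ++ "\">"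
def pvSelfLine (d n : String) (level : Nat) : String :=
  pvPad level ++ "<Directory Id=\"" ++ d ++ "\" Name=\"" ++ n ++ "\" />"
def pvCloseStr (level : Nat) : String := pvPad level ++ "</Directory>"
def pvGlue (ls : List String) (c : String) : List String :=
  PySem.List.pySetD ls (-1) (PySem.List.pyGetD ls (-1) "" ++ c)

-- denotation: the flat list of output lines of one node / of a parent's children
def pvLines (tree : PySem.Dict String (List (String × String))) :
    Nat → String → Nat → List String
  | 0, _, _ => []
  | fd+1, p, level =>
    (PySem.List.sorted2 (tree.getD p []) (fun dn => dn.1) (fun dn => dn.2)).foldl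
      (fun out dn =>
        if pvLines tree fd dn.1 (level + 1) ≠ [] then
          (out ++ [pvOpenLine dn.1 dn.2 level]) ++
            pvGlue (pvLines tree fd dn.1 (level + 1)) (pvCloseStr level)
        else out ++ [pvSelfLine dn.1 dn.2 level]) []

def pvNodeLines (tree : PySem.Dict String (List (String × String)))
    (fd : Nat) (d n : String) (level : Nat) : List String :=
  if pvLines tree fd d (level + 1) ≠ [] then
    pvOpenLine d n level :: pvGlue (pvLines tree fd d (level + 1)) (pvCloseStr level)
  else [pvSelfLine d n level]

-- group of children recorded for parent c
def pvGrp (l : List (String × String × String)) (c : String) : List (String × String) :=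
  (l.filter (fun t => t.1 == c)).map (fun t => t.2)

lemma pvTreeA_getD (l : List (String × String × String)) (c : String) :
    (pvTreeA l).getD c [] = pvGrp l c := by
  unfold pvTreeA pvGrp
  rw [PySem.Dict.getD_foldl_modify_append]
  simp [pysem]

lemma pvContains_aux (c : String) (l : List (String × String × String)) :
    ∀ d : PySem.Dict String (List (String × String)),
    (l.foldl (fun tree t => tree.modify t.1 [] (fun l => l ++ [t.2])) d).contains c
      = (d.contains c || l.any (fun t => t.1 == c)) := by
  induction l with
  | nil => simp
  | cons x xs ih =>
    intro d
    simp only [List.foldl_cons, ih, PySem.Dict.contains_modify, List.any_cons]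
    cases h : (c == x.1) <;> cases h2 : (x.1 == c) <;> simp_all [BEq.comm]

lemma pvTreeA_contains (l : List (String × String × String)) (c : String) :
    (pvTreeA l).contains c = l.any (fun t => t.1 == c) := by
  unfold pvTreeA
  rw [pvContains_aux]
  simp [pysem]

lemma pvGrp_eq_nil_of_not_contains (l : List (String × String × String)) (c : String)
    (h : (pvTreeA l).contains c = false) : pvGrp l c = [] := by
  rw [pvTreeA_contains] at h
  unfold pvGrp
  rw [List.filter_eq_nil_iff.mpr]
  · rfl
  · intro t ht
    simpa using List.any_eq_false.mp h t ht

lemma pvGrp_ne_nil_of_contains (l : List (String × String × String)) (c : String)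
    (h : (pvTreeA l).contains c = true) : pvGrp l c ≠ [] := by
  rw [pvTreeA_contains] at h
  obtain ⟨t, ht, hbeq⟩ := List.any_eq_true.mp h
  unfold pvGrp
  intro hnil
  rw [List.map_eq_nil_iff] at hnil
  exact absurd hnil (List.ne_nil_of_mem (List.mem_filter.mpr ⟨ht, hbeq⟩))

lemma pvEdge_of_mem_grp (l : List (String × String × String)) (c : String)
    {dn : String × String} (h : dn ∈ pvGrp l c) : (c, dn.1) ∈ pvEdges l := by
  unfold pvGrp at h
  obtain ⟨t, ht, rfl⟩ := List.mem_map.mp h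
  have := List.mem_filter.mp ht
  have hc : t.1 = c := by simpa using this.2
  unfold pvEdges
  exact List.mem_map.mpr ⟨t, this.1, by rw [hc]⟩

-- sorted2 membership and length via its permutation property
lemma pvMem_sorted2 {α : Type} (xs : List α) (k1 k2 : α → String) (x : α) :
    x ∈ PySem.List.sorted2 xs k1 k2 ↔ x ∈ xs :=
  (PySem.List.sorted2_perm xs k1 k2 false).mem_iff

lemma pvLength_sorted2 {α : Type} (xs : List α) (k1 k2 : α → String) :
    (PySem.List.sorted2 xs k1 k2).length = xs.length :=
  (PySem.List.sorted2_perm xs k1 k2 false).length_eq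

-- glue lemmas
lemma pvPySetD_neg_one {α : Type} (xs : List α) (h : xs ≠ []) (v : α) :
    PySem.List.pySetD xs (-1) v = xs.dropLast ++ [v] := by
  have hl : 0 < xs.length := List.length_pos_iff.mpr h
  have hidx : PySem.List.pyIdx? xs.length (-1) = some (xs.length - 1) := by
    simp [PySem.List.pyIdx?]; omega
  simp [PySem.List.pySetD, PySem.List.pySet?, hidx]
  rw [List.set_eq_take_append_cons_drop, if_pos (by omega),
    List.drop_eq_nil_of_le (by omega), List.take_eq_dropLast (by omega)]

lemma pvGlue_eq (ls : List String) (h : ls ≠ []) (c : String) :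
    pvGlue ls c = ls.dropLast ++ [ls.getLast h ++ c] := by
  unfold pvGlue
  rw [PySem.List.pyGetD_neg_one _ _ h, pvPySetD_neg_one ls h]

lemma pvGlue_append (xs ys : List String) (h : ys ≠ []) (c : String) :
    pvGlue (xs ++ ys) c = xs ++ pvGlue ys c := by
  have hxy : xs ++ ys ≠ [] := by simp [h]
  rw [pvGlue_eq _ hxy, pvGlue_eq _ h, List.dropLast_append_of_ne_nil h,
    List.getLast_append_of_right_ne_nil xs ys h]
  simp [List.append_assoc]

-- join-shape lemmas (List Char level)
lemma pvJoin_append (s : List Char) (xs ys : List (List Char)) (hx : xs ≠ []) (hy : ys ≠ []) :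
    PySem.Chars.join s (xs ++ ys) = PySem.Chars.join s xs ++ s ++ PySem.Chars.join s ys := by
  induction xs with
  | nil => exact absurd rfl hx
  | cons x xs ih =>
    cases xs with
    | nil =>
      cases ys with
      | nil => exact absurd rfl hy
      | cons y ys => simp only [List.singleton_append, PySem.Chars.join_cons_cons, PySem.Chars.join_singleton]
    | cons x2 xs2 =>
      rw [List.cons_append, show (x2 :: xs2) ++ ys = x2 :: (xs2 ++ ys) from rfl,
        PySem.Chars.join_cons_cons, show x2 :: (xs2 ++ ys) = (x2 :: xs2) ++ ys from rfl,
        ih (by simp), PySem.Chars.join_cons_cons]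
      simp [List.append_assoc]

lemma pvJoin_splice (s c : List Char) (b : List (List Char)) (h : b ≠ []) :
    PySem.Chars.join s (b.dropLast ++ [b.getLast h ++ c]) = PySem.Chars.join s b ++ c := by
  induction b with
  | nil => exact absurd rfl h
  | cons x b ih =>
    cases b with
    | nil => simp [PySem.Chars.join_singleton]
    | cons x2 b2 =>
      have hne : (x2 :: b2) ≠ [] := by simp
      have hgl : (x :: x2 :: b2).getLast h = (x2 :: b2).getLast hne := by
        simp [List.getLast_cons]
      rw [hgl]
      have hdl : (x :: x2 :: b2).dropLast = x :: (x2 :: b2).dropLast := by simp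
      rw [hdl, List.cons_append]
      have hne2 : (x2 :: b2).dropLast ++ [(x2 :: b2).getLast hne ++ c] ≠ [] := by simp
      rw [show (x :: ((x2 :: b2).dropLast ++ [(x2 :: b2).getLast hne ++ c])) = [x] ++ ((x2 :: b2).dropLast ++ [(x2 :: b2).getLast hne ++ c]) from rfl]
      rw [pvJoin_append s [x] _ (by simp) hne2, ih hne]
      simp [PySem.Chars.join_cons_cons, PySem.Chars.join_singleton, List.append_assoc]

lemma pvJoin_flatMap {α : Type} (s : List Char) (K : List α)
    (f : α → List (List Char)) (g : α → List Char)
    (h : ∀ x, f x ≠ [] ∧ PySem.Chars.join s (f x) = g x) :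
    PySem.Chars.join s (K.flatMap f) = PySem.Chars.join s (K.map g) := by
  induction K with
  | nil => rfl
  | cons x K ih =>
    cases K with
    | nil => simp [(h x).2, PySem.Chars.join_singleton]
    | cons y K2 =>
      have hfm : (y :: K2).flatMap f ≠ [] := by
        have hy := (h y).1
        cases hf : f y with
        | nil => exact absurd hf hy
        | cons a as => simp [List.flatMap_cons, hf]
      rw [List.flatMap_cons, pvJoin_append s _ _ (h x).1 hfm, ih, (h x).2,
        show (x :: y :: K2).map g = g x :: g y :: K2.map g from rfl,
        PySem.Chars.join_cons_cons]
      rfl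

lemma pvStrJoin_nil (s : String) : PySem.Str.join s [] = "" := by
  apply String.toList_inj.mp
  simp [PySem.Str.toList_join, PySem.Chars.join_nil]

lemma pvStr_eq_empty_iff (s : String) : s = "" ↔ s.toList = [] := by
  constructor
  · intro h; rw [h]; rfl
  · intro h; exact String.toList_inj.mp (by simp [h])

lemma pvJoin_ne_nil (s a : List Char) (rest : List (List Char)) (ha : a ≠ []) :
    PySem.Chars.join s (a :: rest) ≠ [] := by
  cases rest with
  | nil => rw [PySem.Chars.join_singleton]; exact ha
  | cons b r =>
    rw [PySem.Chars.join_cons_cons]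
    simp only [ne_eq, List.append_eq_nil_iff]
    rintro ⟨⟨h1, -⟩, -⟩
    exact ha h1

lemma pvFoldl_if_append {α β : Type} (P : α → Prop) [DecidablePred P] (u v : α → β)
    (K : List α) (acc : List β) :
    K.foldl (fun acc x => if P x then acc ++ [u x] else acc ++ [v x]) acc
      = acc ++ K.map (fun x => if P x then u x else v x) := by
  induction K generalizing acc with
  | nil => simp
  | cons x K ih =>
    by_cases h : P x <;> simp [h, ih, List.append_assoc]

lemma pvFoldl_if_append_flat {α β : Type} (P : α → Prop) [DecidablePred P] (a c : α → β)
    (b : α → List β) (K : List α) (acc : List β) :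
    K.foldl (fun out x => if P x then (out ++ [a x]) ++ b x else out ++ [c x]) acc
      = acc ++ K.flatMap (fun x => if P x then a x :: b x else [c x]) := by
  induction K generalizing acc with
  | nil => simp
  | cons x K ih =>
    rw [List.foldl_cons, ih, List.flatMap_cons]
    by_cases h : P x
    · rw [if_pos h, if_pos h]; simp [List.append_assoc]
    · rw [if_neg h, if_neg h]; simp [List.append_assoc]

lemma pvLit1 : ("      <Directory Id=\"" : String).toList = "      ".toList ++ "<Directory Id=\"".toList := by decide
lemma pvLit2 : ("\">\n" : String).toList = "\">".toList ++ "\n".toList := by decide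
lemma pvLit3 : ("      </Directory>" : String).toList = "      ".toList ++ "</Directory>".toList := by decide

-- pvLines structure
lemma pvLines_succ (tree : PySem.Dict String (List (String × String))) (fd : Nat) (p : String) (level : Nat) :
    pvLines tree (fd+1) p level
      = (PySem.List.sorted2 (tree.getD p []) (fun dn => dn.1) (fun dn => dn.2)).flatMap
          (fun dn => pvNodeLines tree fd dn.1 dn.2 level) := by
  show (PySem.List.sorted2 (tree.getD p []) (fun dn => dn.1) (fun dn => dn.2)).foldl _ [] = _
  rw [pvFoldl_if_append_flat]
  simp only [List.nil_append, pvNodeLines]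

lemma pvNodeLines_ne_nil (tree : PySem.Dict String (List (String × String)))
    (fd : Nat) (d n : String) (level : Nat) : pvNodeLines tree fd d n level ≠ [] := by
  unfold pvNodeLines
  split
  · simp
  · simp

lemma pvLines_eq_nil_of_not_contains (l : List (String × String × String)) (fd : Nat)
    (p : String) (level : Nat) (h : (pvTreeA l).contains p = false) :
    pvLines (pvTreeA l) fd p level = [] := by
  cases fd with
  | zero => rfl
  | succ fd =>
    rw [pvLines_succ, pvTreeA_getD, pvGrp_eq_nil_of_not_contains l p h]
    rfl

lemma pvLines_ne_nil_of_contains (l : List (String × String × String)) (fd : Nat)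
    (p : String) (level : Nat) (h : (pvTreeA l).contains p = true) :
    pvLines (pvTreeA l) (fd+1) p level ≠ [] := by
  rw [pvLines_succ]
  have hg : pvGrp l p ≠ [] := pvGrp_ne_nil_of_contains l p h
  rcases hK : PySem.List.sorted2 ((pvTreeA l).getD p []) (fun dn => dn.1) (fun dn => dn.2) with _ | ⟨k, ks⟩
  · exfalso
    apply hg
    have := pvLength_sorted2 ((pvTreeA l).getD p []) (fun dn => dn.1) (fun dn => dn.2)
    rw [hK] at this
    rw [pvTreeA_getD] at this
    exact List.length_eq_zero_iff.mp this.symm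
  · simp only [List.flatMap_cons, ne_eq, List.append_eq_nil_iff, not_and]
    intro hnil
    exact absurd hnil (pvNodeLines_ne_nil _ _ _ _ _)

-- ===== pvMain: the denotation's join equals A's recursive string =====
lemma pvMain (tree : PySem.Dict String (List (String × String))) :
    ∀ (fd : Nat) (p : String) (level : Nat),
      PySem.Str.join "\n" (pvLines tree fd p level) = pvBuildXmlA tree fd p level
      ∧ (pvLines tree fd p level = [] ↔ pvBuildXmlA tree fd p level = "") := by
  intro fd
  induction fd with
  | zero =>
    intro p level
    exact ⟨pvStrJoin_nil _, by simp [pvLines, pvBuildXmlA]⟩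
  | succ fd ih =>
    intro p level
    by_cases hc : tree.contains p = false
    · have hg : tree.getD p [] = [] := PySem.Dict.getD_of_not_contains _ _ hc
      have hlines : pvLines tree (fd+1) p level = [] := by
        rw [pvLines_succ, hg]; rfl
      have hxml : pvBuildXmlA tree (fd+1) p level = "" := by
        simp only [pvBuildXmlA]
        rw [if_pos hc]
      rw [hlines, hxml]
      exact ⟨pvStrJoin_nil _, by simp⟩
    · rw [pvLines_succ]
      simp only [pvBuildXmlA]
      rw [if_neg hc]
      rw [pvFoldl_if_append]
      simp only [List.nil_append]
      have helem : ∀ dn : String × String,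
          (List.map String.toList (pvNodeLines tree fd dn.1 dn.2 level)) ≠ []
          ∧ PySem.Chars.join ("\n".toList)
              (List.map String.toList (pvNodeLines tree fd dn.1 dn.2 level))
            = (if ¬ pvBuildXmlA tree fd dn.1 (level + 1) = "" then
                String.ofList (PySem.List.pyRepeat [' ', ' '] (level : Int)) ++ "      <Directory Id=\"" ++ dn.1 ++ "\" Name=\"" ++ dn.2 ++ "\">\n" ++
                  pvBuildXmlA tree fd dn.1 (level + 1) ++ String.ofList (PySem.List.pyRepeat [' ', ' '] (level : Int)) ++ "      </Directory>"
              else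
                String.ofList (PySem.List.pyRepeat [' ', ' '] (level : Int)) ++ "      <Directory Id=\"" ++ dn.1 ++ "\" Name=\"" ++ dn.2 ++ "\" />").toList := by
        intro dn
        obtain ⟨hj, hiff⟩ := ih dn.1 (level + 1)
        by_cases hb : pvLines tree fd dn.1 (level + 1) = []
        · have hx : pvBuildXmlA tree fd dn.1 (level + 1) = "" := hiff.mp hb
          rw [pvNodeLines, if_neg (by simpa using hb), if_neg (by simpa using hx)]
          refine ⟨by simp, ?_⟩
          rw [List.map_singleton, PySem.Chars.join_singleton]
          simp [pvSelfLine, pvPad, String.toList_append, pvLit1, List.append_assoc]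
        · have hx : ¬ pvBuildXmlA tree fd dn.1 (level + 1) = "" := fun h => hb (hiff.mpr h)
          rw [pvNodeLines, if_pos (by simpa using hb), if_pos hx]
          rw [pvGlue_eq _ hb]
          refine ⟨by simp, ?_⟩
          have hmb : List.map String.toList (pvLines tree fd dn.1 (level + 1)) ≠ [] := by
            simpa using hb
          rw [List.map_cons, List.map_append, List.map_singleton]
          rw [← List.singleton_append]
          rw [pvJoin_append _ _ _ (by simp) (by simp), PySem.Chars.join_singleton]
          simp only [String.toList_append]
          rw [List.map_dropLast]
          rw [← List.getLast_map (f := String.toList) hmb]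
          simp only [List.append_assoc]
          rw [pvJoin_splice _ _ _ hmb]
          rw [← PySem.Str.toList_join, hj]
          simp [pvOpenLine, pvCloseStr, pvPad, pvLit1, pvLit2, pvLit3, String.toList_append, List.append_assoc]
      refine ⟨?_, ?_⟩
      · apply String.toList_inj.mp
        rw [PySem.Str.toList_join, PySem.Str.toList_join, List.map_flatMap, List.map_map]
        have := pvJoin_flatMap ("\n".toList)
          (PySem.List.sorted2 (tree.getD p []) (fun dn => dn.1) (fun dn => dn.2)) _ _ helem
        simpa [Function.comp] using this
      · rcases hKc : PySem.List.sorted2 (tree.getD p []) (fun dn => dn.1) (fun dn => dn.2) with _ | ⟨k, ks⟩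
        · simp [pvStrJoin_nil]
        · have h1 := (helem k).1
          constructor
          · intro hcon
            rw [List.flatMap_cons] at hcon
            rcases List.append_eq_nil_iff.mp hcon with ⟨hb1, -⟩
            exact absurd (by rw [hb1]; rfl) h1
          · intro hcon
            exfalso
            rw [pvStr_eq_empty_iff, PySem.Str.toList_join, List.map_map, List.map_cons] at hcon
            refine pvJoin_ne_nil _ _ _ ?_ hcon
            by_cases hck : ¬ pvBuildXmlA tree fd k.1 (level + 1) = ""
            · rw [Function.comp_apply, if_pos hck]
              simp only [String.toList_append]
              intro hnil
              rcases List.append_eq_nil_iff.mp hnil with ⟨-, h2⟩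
              exact absurd h2 (by decide)
            · rw [Function.comp_apply, if_neg hck]
              simp only [String.toList_append]
              intro hnil
              rcases List.append_eq_nil_iff.mp hnil with ⟨-, h2⟩
              exact absurd h2 (by decide)

-- ===== the machine: step lemmas, step counts, simulation =====
lemma pvMachineB_nil (tree : PySem.Dict String (List (String × String))) (fm : Nat) (lines : List String) :
    pvMachineB tree fm [] lines = lines := by
  cases fm <;> rfl

lemma pvMachineB_close (tree : PySem.Dict String (List (String × String))) (fm : Nat)
    (x y : String) (level : Nat) (rest : List (String × String × String × Nat)) (lines : List String) :
    pvMachineB tree (fm+1) (("close", x, y, level) :: rest) lines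
      = pvMachineB tree fm rest (pvGlue lines (pvCloseStr level)) := by
  simp [pvMachineB, pvGlue, pvCloseStr, pvPad, String.append_assoc]

lemma pvMachineB_open_leaf (tree : PySem.Dict String (List (String × String))) (fm : Nat)
    (d n : String) (level : Nat) (rest : List (String × String × String × Nat)) (lines : List String)
    (hc : tree.contains d = false) :
    pvMachineB tree (fm+1) (("open", d, n, level) :: rest) lines
      = pvMachineB tree fm rest (lines ++ [pvSelfLine d n level]) := by
  simp [pvMachineB, hc, pvSelfLine, pvPad, String.append_assoc,
    show (("open" : String) == "close") = false from by decide]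

lemma pvMachineB_open_node (tree : PySem.Dict String (List (String × String))) (fm : Nat)
    (d n : String) (level : Nat) (rest : List (String × String × String × Nat)) (lines : List String)
    (hc : tree.contains d = true) :
    pvMachineB tree (fm+1) (("open", d, n, level) :: rest) lines
      = pvMachineB tree fm
          (((PySem.List.sorted2 (tree.getD d []) (fun dn => dn.1) (fun dn => dn.2)).map
              (fun dn => ("open", dn.1, dn.2, level+1))) ++ ("close", "", "", level) :: rest)
          (lines ++ [pvOpenLine d n level]) := by
  simp [pvMachineB, hc, pvOpenLine, pvPad, String.append_assoc,
    show (("open" : String) == "close") = false from by decide]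

-- exact number of loop iterations the machine spends on one node / a block of nodes
def pvSteps (tree : PySem.Dict String (List (String × String))) : Nat → String → Nat
  | 0, _ => 1
  | fd+1, d =>
    if tree.contains d then
      2 + ((PySem.List.sorted2 (tree.getD d []) (fun dn => dn.1) (fun dn => dn.2)).map
            (fun dn => pvSteps tree fd dn.1)).sum
    else 1

def pvStepsF (tree : PySem.Dict String (List (String × String))) (fd : Nat)
    (kids : List (String × String)) : Nat :=
  (kids.map (fun dn => pvSteps tree fd dn.1)).sum

-- depth adequacy: fd bounds the child-chain depth below d
def pvOk (tree : PySem.Dict String (List (String × String))) : Nat → String → Prop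
  | 0, d => tree.contains d = false
  | fd+1, d => ∀ dn ∈ tree.getD d [], pvOk tree fd dn.1

lemma pvSteps_one_of_not_contains (tree : PySem.Dict String (List (String × String)))
    (fd : Nat) (d : String) (hc : tree.contains d = false) : pvSteps tree fd d = 1 := by
  cases fd with
  | zero => rfl
  | succ fd => simp [pvSteps, hc]

-- the simulation: with the exact step count as fuel head-start, processing a block of
-- sorted "open" tokens appends exactly the denotation's lines
lemma pvSim (l : List (String × String × String)) :
    ∀ (fd : Nat) (kids : List (String × String)) (level : Nat)
      (S : List (String × String × String × Nat)) (lines : List String),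
      (∀ dn ∈ kids, pvOk (pvTreeA l) fd dn.1) →
      ∀ fm, pvMachineB (pvTreeA l) (pvStepsF (pvTreeA l) fd kids + fm)
              (kids.map (fun dn => ("open", dn.1, dn.2, level)) ++ S) lines
          = pvMachineB (pvTreeA l) fm S
              (lines ++ kids.flatMap (fun dn => pvNodeLines (pvTreeA l) fd dn.1 dn.2 level)) := by
  intro fd
  induction fd with
  | zero =>
    intro kids
    induction kids with
    | nil =>
      intro level S lines _ fm
      simp [pvStepsF]
    | cons dn rest ih =>
      intro level S lines h fm
      have hc : (pvTreeA l).contains dn.1 = false := h dn List.mem_cons_self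
      have hsteps : pvStepsF (pvTreeA l) 0 (dn :: rest) + fm
          = (pvStepsF (pvTreeA l) 0 rest + fm) + 1 := by
        simp only [pvStepsF, List.map_cons, List.sum_cons,
          pvSteps_one_of_not_contains _ _ _ hc]
        omega
      rw [hsteps, List.map_cons, List.cons_append,
        pvMachineB_open_leaf _ _ _ _ _ _ _ hc,
        ih level S (lines ++ [pvSelfLine dn.1 dn.2 level]) (fun x hx => h x (List.mem_cons_of_mem _ hx)) fm]
      have hnode : pvNodeLines (pvTreeA l) 0 dn.1 dn.2 level = [pvSelfLine dn.1 dn.2 level] := by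
        unfold pvNodeLines
        rw [if_neg (by simp [pvLines])]
      rw [List.flatMap_cons, hnode]
      simp [List.append_assoc]
  | succ fd ihfd =>
    intro kids
    induction kids with
    | nil =>
      intro level S lines _ fm
      simp [pvStepsF]
    | cons dn rest ih =>
      intro level S lines h fm
      by_cases hc : (pvTreeA l).contains dn.1 = true
      · -- interior node: open line, children block, close token
        have hokdn := h dn List.mem_cons_self
        have hok' : ∀ x ∈ PySem.List.sorted2 ((pvTreeA l).getD dn.1 []) (fun dn => dn.1) (fun dn => dn.2),
            pvOk (pvTreeA l) fd x.1 := by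
          intro x hx
          exact hokdn x ((pvMem_sorted2 _ _ _ x).mp hx)
        have hsteps : pvStepsF (pvTreeA l) (fd+1) (dn :: rest) + fm
            = (pvStepsF (pvTreeA l) fd
                (PySem.List.sorted2 ((pvTreeA l).getD dn.1 []) (fun dn => dn.1) (fun dn => dn.2))
              + (1 + (pvStepsF (pvTreeA l) (fd+1) rest + fm))) + 1 := by
          simp only [pvStepsF, List.map_cons, List.sum_cons, pvSteps, hc, if_true]
          omega
        rw [hsteps, List.map_cons, List.cons_append,
          pvMachineB_open_node _ _ _ _ _ _ _ hc,
          ihfd (PySem.List.sorted2 ((pvTreeA l).getD dn.1 []) (fun dn => dn.1) (fun dn => dn.2))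
            (level+1) (("close", "", "", level) :: (rest.map (fun dn => ("open", dn.1, dn.2, level)) ++ S))
            (lines ++ [pvOpenLine dn.1 dn.2 level]) hok']
        have h1 : (1 : Nat) + (pvStepsF (pvTreeA l) (fd+1) rest + fm)
            = (pvStepsF (pvTreeA l) (fd+1) rest + fm) + 1 := by omega
        rw [h1, pvMachineB_close]
        have hbody : (PySem.List.sorted2 ((pvTreeA l).getD dn.1 []) (fun dn => dn.1) (fun dn => dn.2)).flatMap
            (fun x => pvNodeLines (pvTreeA l) fd x.1 x.2 (level+1))
            = pvLines (pvTreeA l) (fd+1) dn.1 (level+1) := (pvLines_succ _ _ _ _).symm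
        have hbne : pvLines (pvTreeA l) (fd+1) dn.1 (level+1) ≠ [] :=
          pvLines_ne_nil_of_contains l fd dn.1 (level+1) hc
        have hglue : pvGlue ((lines ++ [pvOpenLine dn.1 dn.2 level]) ++
              pvLines (pvTreeA l) (fd+1) dn.1 (level+1)) (pvCloseStr level)
            = lines ++ pvNodeLines (pvTreeA l) (fd+1) dn.1 dn.2 level := by
          rw [pvGlue_append _ _ hbne]
          unfold pvNodeLines
          rw [if_pos (by simpa using hbne)]
          simp [List.append_assoc]
        rw [hbody, hglue, ih level S (lines ++ pvNodeLines (pvTreeA l) (fd+1) dn.1 dn.2 level)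
          (fun x hx => h x (List.mem_cons_of_mem _ hx)) fm]
        rw [List.flatMap_cons]
        simp [List.append_assoc]
      · -- leaf
        have hcf : (pvTreeA l).contains dn.1 = false := by
          cases hx : (pvTreeA l).contains dn.1
          · rfl
          · exact absurd hx hc
        have hsteps : pvStepsF (pvTreeA l) (fd+1) (dn :: rest) + fm
            = (pvStepsF (pvTreeA l) (fd+1) rest + fm) + 1 := by
          simp only [pvStepsF, List.map_cons, List.sum_cons,
            pvSteps_one_of_not_contains _ _ _ hcf]
          omega
        rw [hsteps, List.map_cons, List.cons_append,
          pvMachineB_open_leaf _ _ _ _ _ _ _ hcf,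
          ih level S (lines ++ [pvSelfLine dn.1 dn.2 level]) (fun x hx => h x (List.mem_cons_of_mem _ hx)) fm]
        have hnode : pvNodeLines (pvTreeA l) (fd+1) dn.1 dn.2 level = [pvSelfLine dn.1 dn.2 level] := by
          unfold pvNodeLines
          rw [if_neg (by simpa using pvLines_eq_nil_of_not_contains l (fd+1) dn.1 (level+1) hcf)]
        rw [List.flatMap_cons, hnode]
        simp [List.append_assoc]

-- ===== Kahn acyclicity gives a bound on linked edge paths =====
def pvLinked : List (String × String) → Prop
  | [] => True
  | [_] => True
  | e1 :: e2 :: p => e1.2 = e2.1 ∧ pvLinked (e2 :: p)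

lemma pvLinked_tail {e : String × String} {p : List (String × String)}
    (h : pvLinked (e :: p)) : pvLinked p := by
  cases p with
  | nil => trivial
  | cons f p2 => exact h.2

lemma pvTail_mem (es : List (String × String)) :
    ∀ (p : List (String × String)) (e : String × String), pvLinked (e :: p) →
      (∀ f ∈ e :: p, f ∈ es) →
      ∀ f ∈ p, f ∈ es.filter (fun x => es.any (fun e' => e'.2 == x.1)) := by
  intro p
  induction p with
  | nil => intro e _ _ f hf; exact absurd hf (List.not_mem_nil)
  | cons g p2 ih =>
    intro e hlink hmem f hf
    rcases List.mem_cons.mp hf with rfl | hf2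
    · refine List.mem_filter.mpr ⟨hmem f (List.mem_cons_of_mem _ List.mem_cons_self), ?_⟩
      refine List.any_eq_true.mpr ⟨e, hmem e List.mem_cons_self, ?_⟩
      have : e.2 = f.1 := hlink.1
      simpa using this
    · exact ih g hlink.2 (fun x hx => hmem x (List.mem_cons_of_mem _ hx)) f hf2

lemma pvKahn_bound : ∀ (n : Nat) (es : List (String × String)), pvAcyclic n es = true →
    ∀ p : List (String × String), pvLinked p → (∀ e ∈ p, e ∈ es) → p.length ≤ n := by
  intro n
  induction n with
  | zero =>
    intro es hacy p hlink hmem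
    cases es with
    | nil =>
      cases p with
      | nil => simp
      | cons e p2 => exact absurd (hmem e List.mem_cons_self) (List.not_mem_nil)
    | cons x xs => exact absurd hacy (by simp [pvAcyclic])
  | succ n ih =>
    intro es hacy p hlink hmem
    cases es with
    | nil =>
      cases p with
      | nil => simp
      | cons e p2 => exact absurd (hmem e List.mem_cons_self) (List.not_mem_nil)
    | cons x xs =>
      have hacy' : pvAcyclic n ((x :: xs).filter (fun e => (x :: xs).any (fun e' => e'.2 == e.1))) = true := by
        have h := hacy
        simp only [pvAcyclic] at h
        split at h
        · exact absurd h (by simp)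
        · exact h
      cases p with
      | nil => simp
      | cons e p2 =>
        have htail := pvTail_mem (x :: xs) p2 e hlink hmem
        have := ih _ hacy' p2 (pvLinked_tail hlink) htail
        simpa using Nat.succ_le_succ this

-- ===== reachable-set lemmas =====
lemma pvReach_subset (es : List (String × String)) :
    ∀ (n : Nat) (r : List String) (x : String), x ∈ r → x ∈ pvReach es n r := by
  intro n
  induction n with
  | zero => intro r x hx; exact hx
  | succ n ih =>
    intro r x hx
    simp only [pvReach]
    split
    · exact hx
    · exact ih _ x (List.mem_append_left _ hx)

lemma pvContains_iff_mem (r : List String) (x : String) : r.contains x = true ↔ x ∈ r := by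
  simp

lemma pvReach_closed (es : List (String × String)) :
    ∀ (n : Nat) (r : List String), r.Nodup →
      (∀ x ∈ r, x ∈ "INSTALLFOLDER" :: es.map Prod.snd) →
      es.length + 2 ≤ n + r.length →
      ∀ e ∈ es, e.1 ∈ pvReach es n r → e.2 ∈ pvReach es n r := by
  intro n
  induction n with
  | zero =>
    intro r hnd hsub hlen e _ _
    exfalso
    have hle : r.length ≤ ("INSTALLFOLDER" :: es.map Prod.snd).length := by
      have h1 : r.length = r.toFinset.card := (List.toFinset_card_of_nodup hnd).symm
      have h2 : r.toFinset ⊆ ("INSTALLFOLDER" :: es.map Prod.snd).toFinset := by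
        intro a ha
        rw [List.mem_toFinset] at ha ⊢
        exact hsub a ha
      calc r.length = r.toFinset.card := h1
        _ ≤ ("INSTALLFOLDER" :: es.map Prod.snd).toFinset.card := Finset.card_le_card h2
        _ ≤ ("INSTALLFOLDER" :: es.map Prod.snd).length := List.toFinset_card_le _
    simp only [List.length_cons, List.length_map] at hle
    omega
  | succ n ih =>
    intro r hnd hsub hlen e hes hmem
    by_cases hadd : (((es.filter (fun e => r.contains e.1)).map (fun e => e.2)).filter
        (fun b => !(r.contains b))).dedup = []
    · have hres : pvReach es (n+1) r = r := by
        simp only [pvReach]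
        rw [if_pos hadd]
      rw [hres] at hmem ⊢
      by_contra hnotin
      have hX : ∀ b, b ∉ ((es.filter (fun e => r.contains e.1)).map (fun e => e.2)).filter
          (fun b => !(r.contains b)) := by
        intro b hb
        have hbd : b ∈ (((es.filter (fun e => r.contains e.1)).map (fun e => e.2)).filter
            (fun b => !(r.contains b))).dedup := List.mem_dedup.mpr hb
        rw [hadd] at hbd
        exact absurd hbd (List.not_mem_nil)
      have he1 : r.contains e.1 = true := (pvContains_iff_mem r e.1).mpr hmem
      have he2mem : e.2 ∈ (es.filter (fun e => r.contains e.1)).map (fun e => e.2) :=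
        List.mem_map.mpr ⟨e, List.mem_filter.mpr ⟨hes, by simpa using he1⟩, rfl⟩
      have hnc : (!(r.contains e.2)) = true := by
        have hf : r.contains e.2 = false := by
          cases hx : r.contains e.2
          · rfl
          · exact absurd ((pvContains_iff_mem r e.2).mp hx) hnotin
        rw [hf]
        rfl
      exact hX e.2 (List.mem_filter.mpr ⟨he2mem, hnc⟩)
    · have hres : pvReach es (n+1) r
          = pvReach es n (r ++ (((es.filter (fun e => r.contains e.1)).map (fun e => e.2)).filter
              (fun b => !(r.contains b))).dedup) := by
        simp only [pvReach]
        rw [if_neg hadd]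
      rw [hres] at hmem ⊢
      set add := (((es.filter (fun e => r.contains e.1)).map (fun e => e.2)).filter
          (fun b => !(r.contains b))).dedup with hadddef
      have haddnotr : ∀ a ∈ add, a ∉ r := by
        intro a ha
        have := (List.mem_filter.mp (List.mem_dedup.mp ha)).2
        intro har
        rw [(pvContains_iff_mem r a).mpr har] at this
        simp at this
      refine ih (r ++ add) ?_ ?_ ?_ e hes hmem
      · exact List.Nodup.append hnd (List.nodup_dedup _)
          (fun a har haadd => haddnotr a haadd har)
      · intro x hx
        rcases List.mem_append.mp hx with hx | hx
        · exact hsub x hx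
        · have := (List.mem_filter.mp (List.mem_dedup.mp hx)).1
          obtain ⟨f, hf, rfl⟩ := List.mem_map.mp this
          exact List.mem_cons_of_mem _ (List.mem_map.mpr ⟨f, List.mem_of_mem_filter hf, rfl⟩)
      · have : 1 ≤ add.length := by
          cases hadd2 : add with
          | nil => exact absurd hadd2 hadd
          | cons a as => simp
        rw [List.length_append]
        omega

lemma pvRoot_mem (l : List (String × String × String)) :
    "INSTALLFOLDER" ∈ pvReachable l :=
  pvReach_subset _ _ _ _ (List.mem_cons_self)

lemma pvReachable_closure (l : List (String × String × String)) :
    ∀ e ∈ pvEdges l, e.1 ∈ pvReachable l → e.2 ∈ pvReachable l := by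
  intro e he hmem
  exact pvReach_closed (pvEdges l) ((pvEdges l).length + 1) ["INSTALLFOLDER"]
    (by simp) (by intro x hx; simp at hx; simp [hx]) (by simp) e he hmem

-- ===== from Pre_ to the depth-adequacy predicate =====
lemma pvMem_esr (l : List (String × String × String)) {d c : String}
    (hd : d ∈ pvReachable l) (he : (d, c) ∈ pvEdges l) : (d, c) ∈ pvESR l := by
  refine List.mem_filter.mpr ⟨he, ?_⟩
  simpa using (pvContains_iff_mem _ d).mpr hd

lemma pvOk_of_path_bound (l : List (String × String × String)) :
    ∀ (fd : Nat) (d : String), d ∈ pvReachable l →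
      (∀ (e : String × String) (p : List (String × String)), pvLinked (e :: p) →
        (∀ f ∈ e :: p, f ∈ pvESR l) → e.1 = d → (e :: p).length ≤ fd) →
      pvOk (pvTreeA l) fd d := by
  intro fd
  induction fd with
  | zero =>
    intro d hd hbound
    show (pvTreeA l).contains d = false
    cases hx : (pvTreeA l).contains d
    · rfl
    · exfalso
      obtain ⟨dn, hdn⟩ := List.exists_mem_of_ne_nil _ (pvGrp_ne_nil_of_contains l d hx)
      have hedge : (d, dn.1) ∈ pvESR l := pvMem_esr l hd (pvEdge_of_mem_grp l d hdn)
      have := hbound (d, dn.1) [] trivial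
        (by intro f hf; rcases List.mem_cons.mp hf with rfl | hf2
            · exact hedge
            · exact absurd hf2 (List.not_mem_nil)) rfl
      simp at this
  | succ fd ih =>
    intro d hd hbound
    show ∀ dn ∈ (pvTreeA l).getD d [], pvOk (pvTreeA l) fd dn.1
    intro dn hdn
    rw [pvTreeA_getD] at hdn
    have hedgeE : (d, dn.1) ∈ pvEdges l := pvEdge_of_mem_grp l d hdn
    have hedge : (d, dn.1) ∈ pvESR l := pvMem_esr l hd hedgeE
    have hreach : dn.1 ∈ pvReachable l := pvReachable_closure l (d, dn.1) hedgeE hd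
    refine ih dn.1 hreach ?_
    intro e p hlink hmem he1
    have hlink2 : pvLinked ((d, dn.1) :: e :: p) := ⟨he1.symm, hlink⟩
    have hmem2 : ∀ f ∈ (d, dn.1) :: e :: p, f ∈ pvESR l := by
      intro f hf
      rcases List.mem_cons.mp hf with rfl | hf2
      · exact hedge
      · exact hmem f hf2
    have := hbound (d, dn.1) (e :: p) hlink2 hmem2 rfl
    simpa using Nat.lt_succ_iff.mp (by simpa using this)

lemma pvOk_all (l : List (String × String × String))
    (hPre : Pre_create_wix_directory_structure l) :
    ∀ d ∈ pvReachable l, pvOk (pvTreeA l) l.length d := by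
  intro d hd
  refine pvOk_of_path_bound l l.length d hd ?_
  intro e p hlink hmem _
  have hb := pvKahn_bound (pvESR l).length (pvESR l) hPre (e :: p) hlink hmem
  have hle : (pvESR l).length ≤ l.length := by
    calc (pvESR l).length ≤ (pvEdges l).length := List.length_filter_le _ _
      _ = l.length := by simp [pvEdges]
  omega

-- ===== step-count bound: the chosen fuel suffices =====
lemma pvGrp_length_le (l : List (String × String × String)) (c : String) :
    (pvGrp l c).length ≤ l.length := by
  unfold pvGrp
  rw [List.length_map]
  exact List.length_filter_le _ _

lemma pvSteps_le (l : List (String × String × String)) :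
    ∀ (fd : Nat) (d : String),
      pvSteps (pvTreeA l) fd d ≤ (2 * l.length + 2) ^ (fd + 1) := by
  intro fd
  induction fd with
  | zero =>
    intro d
    show 1 ≤ (2 * l.length + 2) ^ 1
    exact Nat.one_le_pow 1 _ (by omega)
  | succ fd ih =>
    intro d
    show pvSteps (pvTreeA l) (fd+1) d ≤ (2 * l.length + 2) ^ (fd + 2)
    have hg1 : 1 ≤ (2 * l.length + 2) ^ (fd + 1) :=
      Nat.one_le_pow _ _ (by omega)
    by_cases hc : (pvTreeA l).contains d
    · have hstep : pvSteps (pvTreeA l) (fd+1) d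
          = 2 + ((PySem.List.sorted2 ((pvTreeA l).getD d []) (fun dn => dn.1) (fun dn => dn.2)).map
              (fun dn => pvSteps (pvTreeA l) fd dn.1)).sum := by
        simp [pvSteps, hc]
      have hsum : ((PySem.List.sorted2 ((pvTreeA l).getD d []) (fun dn => dn.1) (fun dn => dn.2)).map
            (fun dn => pvSteps (pvTreeA l) fd dn.1)).sum
          ≤ l.length * (2 * l.length + 2) ^ (fd + 1) := by
        have hlen : ((PySem.List.sorted2 ((pvTreeA l).getD d []) (fun dn => dn.1) (fun dn => dn.2)).map
              (fun dn => pvSteps (pvTreeA l) fd dn.1)).length ≤ l.length := by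
          rw [List.length_map, pvLength_sorted2, pvTreeA_getD]
          exact pvGrp_length_le l d
        have hball : ∀ x ∈ (PySem.List.sorted2 ((pvTreeA l).getD d []) (fun dn => dn.1) (fun dn => dn.2)).map
              (fun dn => pvSteps (pvTreeA l) fd dn.1), x ≤ (2 * l.length + 2) ^ (fd + 1) := by
          intro x hx
          obtain ⟨dn, _, rfl⟩ := List.mem_map.mp hx
          exact ih dn.1
        calc ((PySem.List.sorted2 ((pvTreeA l).getD d []) (fun dn => dn.1) (fun dn => dn.2)).map
              (fun dn => pvSteps (pvTreeA l) fd dn.1)).sum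
            ≤ ((PySem.List.sorted2 ((pvTreeA l).getD d []) (fun dn => dn.1) (fun dn => dn.2)).map
              (fun dn => pvSteps (pvTreeA l) fd dn.1)).length * (2 * l.length + 2) ^ (fd + 1) := by
              simpa [smul_eq_mul] using List.sum_le_card_nsmul _ _ hball
          _ ≤ l.length * (2 * l.length + 2) ^ (fd + 1) :=
              Nat.mul_le_mul_right _ hlen
      rw [hstep]
      have hpow : (2 * l.length + 2) ^ (fd + 2)
          = (2 * l.length + 2) ^ (fd + 1) * (2 * l.length + 2) := by
        rw [pow_succ]
      rw [hpow]
      set g := (2 * l.length + 2) ^ (fd + 1) with hgdef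
      set N := l.length with hNdef
      have : g * (2 * N + 2) = 2 * (N * g) + 2 * g := by ring
      rw [this]
      have hNg : N * g ≥ 0 := Nat.zero_le _
      omega
    · have hcf : (pvTreeA l).contains d = false := by
        cases hx : (pvTreeA l).contains d
        · rfl
        · exact absurd hx hc
      rw [pvSteps_one_of_not_contains _ _ _ hcf]
      calc 1 ≤ (2 * l.length + 2) ^ (fd + 1) := hg1
        _ ≤ (2 * l.length + 2) ^ (fd + 2) :=
          Nat.pow_le_pow_right (by omega) (by omega)

lemma pvStepsF_le_fuel (l : List (String × String × String)) :
    pvStepsF (pvTreeA l) l.length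
        (PySem.List.sorted2 ((pvTreeA l).getD "INSTALLFOLDER" []) (fun dn => dn.1) (fun dn => dn.2))
      ≤ pvFuelB l := by
  set K := PySem.List.sorted2 ((pvTreeA l).getD "INSTALLFOLDER" []) (fun dn => dn.1) (fun dn => dn.2) with hK
  have hlen : K.length ≤ l.length := by
    rw [hK, pvLength_sorted2, pvTreeA_getD]
    exact pvGrp_length_le l _
  have hball : ∀ x ∈ K.map (fun dn => pvSteps (pvTreeA l) l.length dn.1),
      x ≤ (2 * l.length + 2) ^ (l.length + 1) := by
    intro x hx
    obtain ⟨dn, _, rfl⟩ := List.mem_map.mp hx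
    exact pvSteps_le l l.length dn.1
  have h1 : pvStepsF (pvTreeA l) l.length K
      ≤ K.length * (2 * l.length + 2) ^ (l.length + 1) := by
    unfold pvStepsF
    simpa [smul_eq_mul] using List.sum_le_card_nsmul _ _ hball
  have h2 : K.length * (2 * l.length + 2) ^ (l.length + 1)
      ≤ (2 * l.length + 2) * (2 * l.length + 2) ^ (l.length + 1) :=
    Nat.mul_le_mul_right _ (by omega)
  unfold pvFuelB
  calc pvStepsF (pvTreeA l) l.length K
      ≤ (2 * l.length + 2) * (2 * l.length + 2) ^ (l.length + 1) := le_trans h1 h2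
    _ = (2 * l.length + 2) ^ (l.length + 2) := by rw [← pow_succ']

-- ===== VERDICT (by name: the statement is the Claim_ definition above) =====
theorem create_wix_directory_structure_spec : Claim_equal_create_wix_directory_structure := by
  intro l _ hPre
  unfold Spec_create_wix_directory_structure
  show create_wix_directory_structure l = create_wix_directory_structure_alt l
  set K := PySem.List.sorted2 ((pvTreeA l).getD "INSTALLFOLDER" []) (fun dn => dn.1) (fun dn => dn.2) with hK
  have halt : create_wix_directory_structure_alt l
      = PySem.Str.join "\n" (pvMachineB (pvTreeA l) (pvFuelB l)
          (K.map (fun dn => ("open", dn.1, dn.2, (4 : Nat)))) []) := rfl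
  have hok : ∀ dn ∈ K, pvOk (pvTreeA l) l.length dn.1 := by
    intro dn hdn
    have hg : dn ∈ pvGrp l "INSTALLFOLDER" := by
      rw [hK, pvMem_sorted2, pvTreeA_getD] at hdn
      exact hdn
    have hedge := pvEdge_of_mem_grp l "INSTALLFOLDER" hg
    exact pvOk_all l hPre dn.1 (pvReachable_closure l _ hedge (pvRoot_mem l))
  have hle := pvStepsF_le_fuel l
  rw [← hK] at hle
  have hsplit : pvFuelB l = pvStepsF (pvTreeA l) l.length K + (pvFuelB l - pvStepsF (pvTreeA l) l.length K) := by
    omega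
  have hsim := pvSim l l.length K 4 [] []
    hok (pvFuelB l - pvStepsF (pvTreeA l) l.length K)
  rw [List.append_nil, pvMachineB_nil, List.nil_append] at hsim
  rw [halt, hsplit, hsim]
  have hlines : K.flatMap (fun dn => pvNodeLines (pvTreeA l) l.length dn.1 dn.2 4)
      = pvLines (pvTreeA l) (l.length + 1) "INSTALLFOLDER" 4 := by
    rw [pvLines_succ, hK]
  rw [hlines, (pvMain (pvTreeA l) (l.length + 1) "INSTALLFOLDER" 4).1]
  rfl
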